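-- pv_equiv track=rewrite | github.com/josh-perry/fischer-piece-order-generator | fischerrandom.py | check_king_rook_rule
-- ===== SOURCE A (Python) =====
-- def check_king_rook_rule(layout):
--     rooks_found = 0
--
--     for piece in layout:
--         if piece == 'K' and rooks_found == 1:
--             return True
--
--         if piece == 'R':
--             rooks_found += 1
--
--     return False
-- ===== SOURCE B (Python) =====
-- def check_king_rook_rule(layout):
--     # King must stand strictly between the first rook and the second rook
--     # (or anywhere after the first rook if there is only one).
--     if 'R' not in layout:
--         return False
--     after = layout[layout.index('R') + 1:]
--     between = after[:after.index('R')] if 'R' in after else after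
--     return 'K' in between
-- ===== Notes on version B (the rewrite author's own statement) =====
-- stated objective: simpler
-- what changed: Replaces A's stateful rook-counting scan with an index-then-slice decomposition: find the first rook, slice out the segment up to the second rook (or the end), and test 'K' membership there.
import Mathlib
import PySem

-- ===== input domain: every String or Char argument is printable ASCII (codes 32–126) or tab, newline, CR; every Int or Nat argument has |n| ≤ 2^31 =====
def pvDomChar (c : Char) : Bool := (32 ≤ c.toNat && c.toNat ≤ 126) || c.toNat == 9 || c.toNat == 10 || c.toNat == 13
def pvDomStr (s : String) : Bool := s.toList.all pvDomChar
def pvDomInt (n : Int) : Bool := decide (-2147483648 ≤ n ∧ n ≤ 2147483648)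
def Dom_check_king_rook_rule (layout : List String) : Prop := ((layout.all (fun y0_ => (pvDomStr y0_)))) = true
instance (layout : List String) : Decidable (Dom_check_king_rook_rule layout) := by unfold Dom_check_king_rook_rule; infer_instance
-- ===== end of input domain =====

-- B replaces A's stateful rook-counting scan by index-then-slice membership; objective: simpler decomposition, same O(n) cost.

-- ===== PORT A =====
-- the for-loop with the rooks_found counter, as structural recursion over the list
def pvLoopA : List String → Nat → Bool
  | [], _ => false
  | piece :: rest, rooks_found =>
    if piece == "K" && rooks_found == 1 then true
    else pvLoopA rest (if piece == "R" then rooks_found + 1 else rooks_found)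

def check_king_rook_rule (layout : List String) : Bool :=
  pvLoopA layout 0

-- ===== PORT B =====
def check_king_rook_rule_alt (layout : List String) : Bool :=
  if "R" ∈ layout then
    match PySem.List.index? layout "R" with
    | none => false   -- unreachable: 'R' ∈ layout, so index? is some
    | some i =>
      let after := PySem.List.slice layout (some ((i : Int) + 1)) none
      let between :=
        if "R" ∈ after then
          match PySem.List.index? after "R" with
          | none => after   -- unreachable
          | some j => PySem.List.slice after none (some (j : Int))
        else after
      decide ("K" ∈ between)
  else false

-- ===== PRECONDITION & SPEC =====
def Spec_check_king_rook_rule (layout : List String) (out : Bool) : Prop := out = check_king_rook_rule_alt layout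
instance (layout : List String) (out : Bool) : Decidable (Spec_check_king_rook_rule layout out) := by unfold Spec_check_king_rook_rule; infer_instance

-- ===== CLAIM (what is proved, stated in full; the proofs are below) =====
def Claim_equal_check_king_rook_rule : Prop := ∀ (layout : List String), Dom_check_king_rook_rule layout → Spec_check_king_rook_rule layout (check_king_rook_rule layout)

-- ===== LEMMAS AND PROOFS =====

-- common middle form: drop up to and including the first 'R', then look for 'K' before the next 'R'
def pvMid (xs : List String) : Bool :=
  match xs.dropWhile (· ≠ "R") with
  | [] => false
  | _ :: rest => decide ("K" ∈ rest.takeWhile (· ≠ "R"))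

lemma pvLoopA_ge2 (xs : List String) : ∀ k, 2 ≤ k → pvLoopA xs k = false := by
  induction xs with
  | nil => intro k _; rfl
  | cons p rest ih =>
    intro k hk
    simp only [pvLoopA]
    have : ¬(p == "K" && k == 1) = true := by
      simp only [Bool.and_eq_true, beq_iff_eq]
      rintro ⟨-, h⟩; omega
    rw [if_neg this]
    split_ifs with h
    · exact ih (k + 1) (by omega)
    · exact ih k hk

lemma pvLoopA_one (xs : List String) :
    pvLoopA xs 1 = decide ("K" ∈ xs.takeWhile (· ≠ "R")) := by
  induction xs with
  | nil => simp [pvLoopA]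
  | cons p rest ih =>
    by_cases hK : p = "K"
    · subst hK
      simp [pvLoopA, List.takeWhile_cons]
    · by_cases hR : p = "R"
      · subst hR
        simp only [pvLoopA]
        rw [if_neg (by simp [hK, (by decide : ("R":String) ≠ "K")]), if_pos (by simp)]
        rw [pvLoopA_ge2 rest 2 (by omega)]
        simp [List.takeWhile_cons]
      · simp only [pvLoopA]
        rw [if_neg (by simp [hK]), if_neg (by simp [hR])]
        rw [ih]
        simp only [List.takeWhile_cons, ne_eq, hR, not_false_eq_true, decide_true, if_pos,
          List.mem_cons, decide_eq_true_eq]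
        simp [Ne.symm hK]

lemma pvLoopA_zero (xs : List String) : pvLoopA xs 0 = pvMid xs := by
  induction xs with
  | nil => rfl
  | cons p rest ih =>
    by_cases hR : p = "R"
    · subst hR
      simp only [pvLoopA]
      rw [if_neg (by simp), if_pos (by simp)]
      rw [pvLoopA_one]
      simp [pvMid, List.dropWhile_cons]
    · simp only [pvLoopA]
      rw [if_neg (by simp), if_neg (by simp [hR])]
      rw [ih]
      simp [pvMid, List.dropWhile_cons, hR]

lemma pvTake_index? (xs : List String) :
    (match PySem.List.index? xs "R" with
      | none => xs
      | some j => xs.take j) = xs.takeWhile (· ≠ "R") := by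
  induction xs with
  | nil => simp [PySem.List.index?_eq_idxOf?]
  | cons p rest ih =>
    by_cases hR : p = "R"
    · subst hR
      rw [PySem.List.index?_cons_self]
      simp [List.takeWhile_cons]
    · rw [PySem.List.index?_cons_of_ne rest hR]
      cases h : PySem.List.index? rest "R" with
      | none =>
        have hnm : "R" ∉ rest := (PySem.List.index?_eq_none_iff rest "R").mp h
        have : rest.takeWhile (· ≠ "R") = rest := by
          rw [List.takeWhile_eq_self_iff]
          intro x hx
          simp only [ne_eq, decide_eq_true_eq]
          rintro rfl
          exact hnm hx
        rw [List.takeWhile_cons, if_pos (by simp [hR])]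
        exact congrArg (p :: ·) this.symm
      | some j =>
        simp only [h, Option.map_some]
        rw [h] at ih
        simp [List.takeWhile_cons, hR, List.take_succ_cons, ih]

lemma pvDrop_index? (xs : List String) (i : Nat)
    (h : PySem.List.index? xs "R" = some i) :
    xs.dropWhile (· ≠ "R") = "R" :: xs.drop (i + 1) := by
  induction xs generalizing i with
  | nil => simp [PySem.List.index?_eq_idxOf?] at h
  | cons p rest ih =>
    by_cases hR : p = "R"
    · subst hR
      rw [PySem.List.index?_cons_self] at h
      cases h
      simp [List.dropWhile_cons]
    · rw [PySem.List.index?_cons_of_ne rest hR] at h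
      cases h2 : PySem.List.index? rest "R" with
      | none => rw [h2] at h; exact absurd h (by simp)
      | some j =>
        rw [h2] at h
        simp only [Option.map_some, Option.some.injEq] at h
        subst h
        rw [List.dropWhile_cons, if_pos (by simp [hR]), ih j h2]
        rfl

lemma alt_eq_mid (xs : List String) : check_king_rook_rule_alt xs = pvMid xs := by
  unfold check_king_rook_rule_alt
  by_cases hmem : "R" ∈ xs
  · rw [if_pos hmem]
    cases h : PySem.List.index? xs "R" with
    | none => exact absurd ((PySem.List.index?_eq_none_iff xs "R").mp h) (by simpa using hmem)
    | some i =>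
      have hdrop : xs.dropWhile (· ≠ "R") = "R" :: xs.drop (i + 1) := pvDrop_index? xs i h
      have hslice : PySem.List.slice xs (some ((i : Int) + 1)) none = xs.drop (i + 1) := by
        have : ((i : Int) + 1) = ((i + 1 : Nat) : Int) := by push_cast; ring
        rw [this, PySem.List.slice_from_natCast]
      simp only [hslice]
      have hbetween :
          (if "R" ∈ xs.drop (i + 1) then
            (match PySem.List.index? (xs.drop (i + 1)) "R" with
              | none => xs.drop (i + 1)
              | some j => PySem.List.slice (xs.drop (i + 1)) none (some (j : Int)))
          else xs.drop (i + 1)) = (xs.drop (i + 1)).takeWhile (· ≠ "R") := by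
        by_cases h2 : "R" ∈ xs.drop (i + 1)
        · rw [if_pos h2]
          rw [← pvTake_index? (xs.drop (i + 1))]
          cases h3 : PySem.List.index? (xs.drop (i + 1)) "R" with
          | none => rfl
          | some j => simp [PySem.List.slice_to_natCast]
        · rw [if_neg h2, List.takeWhile_eq_self_iff.mpr]
          intro x hx
          simp only [ne_eq, decide_eq_true_eq]
          rintro rfl
          exact h2 hx
      rw [hbetween]
      simp only [pvMid, hdrop]
  · rw [if_neg hmem]
    have h0 : xs.dropWhile (· ≠ "R") = [] := by
      rw [List.dropWhile_eq_nil_iff]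
      intro x hx
      simp only [ne_eq, decide_eq_true_eq]
      rintro rfl
      exact hmem hx
    simp only [pvMid, h0]

-- ===== VERDICT (by name: the statement is the Claim_ definition above) =====
theorem check_king_rook_rule_spec : Claim_equal_check_king_rook_rule := by
  intro layout _
  unfold Spec_check_king_rook_rule check_king_rook_rule
  rw [pvLoopA_zero, alt_eq_mid]
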